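-- pv_equiv track=rewrite | github.com/BolluHimana/CP-2 | 02-hasnoprimes-Python/hasnoprimes.py | fun_hasnoprimes
-- ===== SOURCE A (Python) =====
-- def fun_hasnoprimes(l):
--
-- 	for i in range(len(l)):
-- 		for j in range(len(l[i])):
--
-- 			n=l[i][j]
-- 			m=1
-- 			c=0
-- 			while(n>=m):
-- 				if n%m==0:
-- 					c=c+1
-- 					m=m+1
-- 				else:
-- 					m=m+1
-- 			if(c<=2):
-- 				return False
--
-- 	return True
-- ===== SOURCE B (Python) =====
-- def fun_hasnoprimes(l):
--     cells = [x for row in l for x in row]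
--     if not cells:
--         return True
--     if min(cells) < 4:
--         return False
--     mx = max(cells)
--     s = 1
--     while (s + 1) * (s + 1) <= mx:
--         s += 1
--     comp = [False] * (s + 1)
--     for p in range(2, s + 1):
--         for q in range(2 * p, s + 1, p):
--             comp[q] = True
--     primes = [p for p in range(2, s + 1) if not comp[p]]
--     return all(any(p * p <= x and x % p == 0 for p in primes) for x in cells)
-- ===== Notes on version B (the rewrite author's own statement) =====
-- stated objective: alternative
-- what changed: Replaced the per-cell count-all-divisors loop with a table-first design: one sieve of the primes up to sqrt(max cell) built by marking multiples, then each cell is classified by divisibility against that prime table (plus explicit min/empty handling).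
import Mathlib
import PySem

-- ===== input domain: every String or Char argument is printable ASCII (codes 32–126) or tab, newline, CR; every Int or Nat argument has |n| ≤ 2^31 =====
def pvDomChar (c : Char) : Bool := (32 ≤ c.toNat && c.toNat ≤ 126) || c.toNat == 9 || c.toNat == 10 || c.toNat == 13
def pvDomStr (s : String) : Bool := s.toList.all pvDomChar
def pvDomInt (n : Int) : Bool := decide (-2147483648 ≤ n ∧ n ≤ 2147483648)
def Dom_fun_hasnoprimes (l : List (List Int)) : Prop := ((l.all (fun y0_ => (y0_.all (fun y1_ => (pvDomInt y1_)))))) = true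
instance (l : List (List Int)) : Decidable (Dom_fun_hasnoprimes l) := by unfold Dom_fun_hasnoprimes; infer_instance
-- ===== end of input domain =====

-- B replaces A's per-cell divisor-counting loop by a different algorithm: a sieve-built table
-- of the primes up to sqrt(max cell), against which each cell is classified by divisibility
-- (objective: alternative).


-- ===== PORT A =====
-- A's inner while loop: count c of m in [1..n] with n % m == 0
-- (structural recursion on the exact fuel (n+1-m).toNat, the number of remaining iterations)
def aWhileGo : Nat → Int → Int → Int → Int
  | 0, _, _, c => c
  | fuel + 1, n, m, c =>
    if n ≥ m then
      if PySem.Int.mod n m = 0 then aWhileGo fuel n (m + 1) (c + 1)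
      else aWhileGo fuel n (m + 1) c
    else c

def aWhile (n m c : Int) : Int := aWhileGo (n + 1 - m).toNat n m c

-- A's inner for loop over a row, with the early `return False`
def aRow : List Int → Bool
  | [] => true
  | n :: rest => if aWhile n 1 0 ≤ 2 then false else aRow rest

def fun_hasnoprimes (l : List (List Int)) : Bool :=
  match l with
  | [] => true
  | row :: rest =>
    match aRow row with
    | false => false
    | true => fun_hasnoprimes rest

-- ===== PORT B =====
-- s = 1; while (s+1)*(s+1) <= mx: s += 1      (floor square root; fuel (mx-1).toNat bounds the iterations)
def bIsqrtGo : Nat → Int → Int → Int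
  | 0, _, s => s
  | fuel + 1, mx, s =>
    if (s + 1) * (s + 1) ≤ mx then bIsqrtGo fuel mx (s + 1) else s

def bIsqrt (mx : Int) : Int := bIsqrtGo (mx - 1).toNat mx 1

-- comp = [False]*(s+1); for p in range(2, s+1): for q in range(2*p, s+1, p): comp[q] = True
def bSieve (s : Int) : Array Bool :=
  (PySem.List.pyRange 2 (s + 1) 1).foldl
    (fun a p =>
      (PySem.List.pyRange (2 * p) (s + 1) p).foldl
        (fun a q => a.setIfInBounds q.toNat true) a)
    (Array.replicate (s + 1).toNat false)

def fun_hasnoprimes_alt (l : List (List Int)) : Bool :=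
  let cells := l.flatMap id
  if cells = [] then true
  else
    match PySem.List.min? cells (fun x => x) with
    | none => true  -- unreachable: cells ≠ []
    | some mn =>
      if mn < 4 then false
      else
        match PySem.List.max? cells (fun x => x) with
        | none => true  -- unreachable: cells ≠ []
        | some mx =>
          let s := bIsqrt mx
          let comp := bSieve s
          let primes := (PySem.List.pyRange 2 (s + 1) 1).filter
            (fun p => !(comp.getD p.toNat false))
          cells.all (fun x =>
            primes.any (fun p => decide (p * p ≤ x) && (PySem.Int.mod x p == 0)))

-- ===== PRECONDITION & SPEC =====
def Spec_fun_hasnoprimes (l : List (List Int)) (out : Bool) : Prop := out = fun_hasnoprimes_alt l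
instance (l : List (List Int)) (out : Bool) : Decidable (Spec_fun_hasnoprimes l out) := by unfold Spec_fun_hasnoprimes; infer_instance

-- ===== CLAIM (what is proved, stated in full; the proofs are below) =====
def Claim_equal_fun_hasnoprimes : Prop := ∀ (l : List (List Int)), Dom_fun_hasnoprimes l → Spec_fun_hasnoprimes l (fun_hasnoprimes l)

-- ===== LEMMAS AND PROOFS =====

-- the common per-cell property: n has a proper divisor other than 1
def HasProperDiv (n : Int) : Prop := ∃ m : Int, 2 ≤ m ∧ m < n ∧ m ∣ n

-- A side: the while loop counts the divisors of n among [m, n]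
theorem aWhileGo_eq (fuel : Nat) (n : Int) : ∀ (m c : Int), fuel = (n + 1 - m).toNat →
    aWhileGo fuel n m c = c + ((PySem.List.pyRange m (n + 1) 1).countP (fun k => PySem.Int.mod n k == 0)) := by
  induction fuel with
  | zero =>
    intro m c hf
    rw [aWhileGo, PySem.List.pyRange_one_eq_nil (by omega)]
    simp
  | succ f ih =>
    intro m c hf
    rw [aWhileGo]
    have h : n ≥ m := by omega
    rw [if_pos h, PySem.List.pyRange_one_cons (by omega), List.countP_cons]
    by_cases hd : PySem.Int.mod n m = 0
    · rw [if_pos hd, ih (m + 1) (c + 1) (by omega)]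
      simp only [hd, beq_self_eq_true, if_pos]
      push_cast; ring
    · rw [if_neg hd, ih (m + 1) c (by omega)]
      simp [hd]

theorem aWhile_eq (n m c : Int) :
    aWhile n m c = c + ((PySem.List.pyRange m (n + 1) 1).countP (fun k => PySem.Int.mod n k == 0)) := by
  rw [aWhile]
  exact aWhileGo_eq _ n m c rfl

theorem aCell_iff (n : Int) : (¬ aWhile n 1 0 ≤ 2) ↔ HasProperDiv n := by
  rw [aWhile_eq]
  by_cases h2 : 2 ≤ n
  · rw [PySem.List.pyRange_one_append 1 2 (n + 1) (by omega) (by omega),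
        PySem.List.pyRange_one_append 2 n (n + 1) (by omega) (by omega)]
    rw [show PySem.List.pyRange 1 2 1 = [1] by decide, PySem.List.pyRange_one_singleton n]
    have d1 : (PySem.Int.mod n 1 == 0) = true := by
      simp [PySem.Int.mod_eq_zero_iff_dvd]
    have dn : (PySem.Int.mod n n == 0) = true := by
      simp [PySem.Int.mod_eq_zero_iff_dvd]
    have key : List.countP (fun k => PySem.Int.mod n k == 0)
        ([1] ++ (PySem.List.pyRange 2 n 1 ++ [n]))
        = List.countP (fun k => PySem.Int.mod n k == 0) (PySem.List.pyRange 2 n 1) + 2 := by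
      simp [List.countP_append, List.countP_cons, d1, dn]
    rw [key]
    constructor
    · intro h
      have hpos : 0 < (PySem.List.pyRange 2 n 1).countP (fun k => PySem.Int.mod n k == 0) := by omega
      obtain ⟨k, hk, hdk⟩ := List.countP_pos_iff.mp hpos
      rw [PySem.List.mem_pyRange_one] at hk
      refine ⟨k, hk.1, hk.2, ?_⟩
      have := (PySem.Int.mod_eq_zero_iff_dvd n k).mp (by simpa using hdk)
      exact this
    · rintro ⟨m, hm2, hmn, hdvd⟩
      intro h
      have hz : (PySem.List.pyRange 2 n 1).countP (fun k => PySem.Int.mod n k == 0) = 0 := by omega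
      have := List.countP_eq_zero.mp hz m (by rw [PySem.List.mem_pyRange_one]; exact ⟨hm2, hmn⟩)
      exact this (by simp [PySem.Int.mod_eq_zero_iff_dvd, hdvd])
  · constructor
    · intro h
      exfalso
      have hlen : ((PySem.List.pyRange 1 (n + 1) 1).countP (fun k => PySem.Int.mod n k == 0))
          ≤ (PySem.List.pyRange 1 (n + 1) 1).length := List.countP_le_length
      rw [PySem.List.length_pyRange_one] at hlen
      omega
    · rintro ⟨m, hm2, hmn, _⟩
      omega

-- A's inner loop is `all` of the per-cell property
theorem aRow_eq (row : List Int) :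
    aRow row = row.all (fun n => !(aWhile n 1 0 ≤ 2 : Bool)) := by
  induction row with
  | nil => rfl
  | cons n rest ih =>
    rw [aRow, List.all_cons, ih]
    by_cases h : aWhile n 1 0 ≤ 2 <;> simp [h]

theorem funA_eq (l : List (List Int)) :
    fun_hasnoprimes l = (l.flatMap id).all (fun n => !(aWhile n 1 0 ≤ 2 : Bool)) := by
  induction l with
  | nil => rfl
  | cons row rest ih =>
    rw [fun_hasnoprimes]
    simp only [List.flatMap_cons, List.all_append, id_eq, ← aRow_eq, ← ih]
    cases h : aRow row <;> simp [h]

-- B side: the marking folds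
theorem foldl_mark_size (qs : List Int) (a : Array Bool) :
    (qs.foldl (fun a q => a.setIfInBounds q.toNat true) a).size = a.size := by
  induction qs generalizing a with
  | nil => rfl
  | cons q t ih => rw [List.foldl_cons, ih, Array.size_setIfInBounds]

theorem foldl_mark_getD (qs : List Int) (a : Array Bool) (i : Nat)
    (hq : ∀ q ∈ qs, q.toNat < a.size) :
    (qs.foldl (fun a q => a.setIfInBounds q.toNat true) a).getD i false =
      (a.getD i false || qs.any (fun q => q.toNat == i)) := by
  induction qs generalizing a with
  | nil => simp
  | cons q t ih =>
    rw [List.foldl_cons, ih _ (fun q' hq' => by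
      rw [Array.size_setIfInBounds]; exact hq q' (List.mem_cons_of_mem _ hq'))]
    have hqlt : q.toNat < a.size := hq q (List.mem_cons_self)
    by_cases h : q.toNat = i
    · subst h
      simp [Array.getD_eq_getD_getElem?, Array.getElem?_setIfInBounds, hqlt]
    · have hbeq : (q.toNat == i) = false := beq_eq_false_iff_ne.mpr h
      simp [Array.getD_eq_getD_getElem?, Array.getElem?_setIfInBounds, h, hbeq]

theorem outer_mark_getD (mx : Int) (ps : List Int) (a : Array Bool) (i : Nat)
    (hsz : a.size = (mx + 1).toNat)
    (hps : ∀ p ∈ ps, 2 ≤ p) :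
    (ps.foldl (fun a p =>
        (PySem.List.pyRange (2 * p) (mx + 1) p).foldl
          (fun a q => a.setIfInBounds q.toNat true) a) a).getD i false =
      (a.getD i false ||
        ps.any (fun p => (PySem.List.pyRange (2 * p) (mx + 1) p).any (fun q => q.toNat == i))) := by
  induction ps generalizing a with
  | nil => simp
  | cons p t ih =>
    have hp2 : 2 ≤ p := hps p (List.mem_cons_self)
    have hqlt : ∀ q ∈ PySem.List.pyRange (2 * p) (mx + 1) p, q.toNat < a.size := by
      intro q hqm
      rw [PySem.List.mem_pyRange_iff_of_pos (by omega)] at hqm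
      omega
    rw [List.foldl_cons, ih _ (by rw [foldl_mark_size]; exact hsz)
          (fun p' hp' => hps p' (List.mem_cons_of_mem _ hp')),
        foldl_mark_getD _ _ _ hqlt]
    simp [Bool.or_assoc]

theorem bSieve_getD (mx : Int) (i : Nat) :
    ((bSieve mx).getD i false = true) ↔
      (∃ p : Int, 2 ≤ p ∧ p ∣ (i : Int) ∧ 2 * p ≤ (i : Int) ∧ (i : Int) ≤ mx) := by
  rw [bSieve, outer_mark_getD mx _ _ i (by simp)
        (fun p hp => ((PySem.List.mem_pyRange_one).mp hp).1)]
  have hrepl : (Array.replicate (mx + 1).toNat false).getD i false = false := by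
    rw [Array.getD_eq_getD_getElem?, Array.getElem?_replicate]
    split <;> simp
  rw [hrepl, Bool.false_or, List.any_eq_true]
  constructor
  · rintro ⟨p, hpmem, hq⟩
    rw [List.any_eq_true] at hq
    obtain ⟨q, hqmem, hqi⟩ := hq
    rw [PySem.List.mem_pyRange_one] at hpmem
    rw [PySem.List.mem_pyRange_iff_of_pos (by omega)] at hqmem
    obtain ⟨hq1, hq2, hq3⟩ := hqmem
    have hqnn : 0 ≤ q := by omega
    have hqi' : q = (i : Int) := by
      have := of_decide_eq_true (by simpa using hqi)
      omega
    refine ⟨p, hpmem.1, ?_, by omega, by omega⟩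
    have : p ∣ q := by
      have h2p : p ∣ 2 * p := Dvd.intro 2 (by ring)
      have := dvd_add hq3 h2p
      simpa using this
    rwa [hqi'] at this
  · rintro ⟨p, hp2, hpd, hp2p, hplemx⟩
    refine ⟨p, ?_, ?_⟩
    · rw [PySem.List.mem_pyRange_one]
      constructor
      · exact hp2
      · omega
    · rw [List.any_eq_true]
      refine ⟨(i : Int), ?_, by simp⟩
      rw [PySem.List.mem_pyRange_iff_of_pos (by omega)]
      refine ⟨hp2p, by omega, ?_⟩
      exact dvd_sub hpd (Dvd.intro 2 (by ring))

-- the common characterisation B's per-cell test decides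
theorem hasProperDiv_iff (x : Int) :
    HasProperDiv x ↔ (4 ≤ x ∧ ∃ p : Int, 2 ≤ p ∧ p ∣ x ∧ 2 * p ≤ x) := by
  constructor
  · rintro ⟨m, hm2, hmx, k, hk⟩
    have hk2 : 2 ≤ k := by nlinarith
    have h2m : 2 * m ≤ x := by nlinarith
    exact ⟨by omega, m, hm2, ⟨k, hk⟩, h2m⟩
  · rintro ⟨h4, p, hp2, hpd, hp2p⟩
    exact ⟨p, hp2, by omega, hpd⟩

theorem bIsqrtGo_spec (fuel : Nat) (mx : Int) : ∀ s : Int, 1 ≤ s → s * s ≤ mx →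
    (mx - s).toNat ≤ fuel →
    1 ≤ bIsqrtGo fuel mx s ∧ (bIsqrtGo fuel mx s) * (bIsqrtGo fuel mx s) ≤ mx ∧
      mx < (bIsqrtGo fuel mx s + 1) * (bIsqrtGo fuel mx s + 1) := by
  induction fuel with
  | zero =>
    intro s hs1 hss hf
    have hms : mx ≤ s := by omega
    have hs1' : s ≤ 1 := by nlinarith
    have hseq : s = 1 := le_antisymm hs1' hs1
    subst hseq
    rw [bIsqrtGo]
    refine ⟨le_refl 1, hss, by omega⟩
  | succ f ih =>
    intro s hs1 hss hf
    rw [bIsqrtGo]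
    by_cases h : (s + 1) * (s + 1) ≤ mx
    · rw [if_pos h]
      have hsm : s + 1 ≤ mx := by nlinarith
      exact ih (s + 1) (by omega) h (by omega)
    · rw [if_neg h]
      exact ⟨hs1, hss, by omega⟩

theorem bIsqrt_spec (mx : Int) (hmx : 1 ≤ mx) :
    1 ≤ bIsqrt mx ∧ (bIsqrt mx) * (bIsqrt mx) ≤ mx ∧ mx < (bIsqrt mx + 1) * (bIsqrt mx + 1) := by
  rw [bIsqrt]
  exact bIsqrtGo_spec (mx - 1).toNat mx 1 (le_refl 1) (by omega) (by omega)

-- membership in B's prime table = "no proper divisor", for the sieve bound s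
theorem mem_primes_iff (s p : Int) :
    (p ∈ (PySem.List.pyRange 2 (s + 1) 1).filter (fun p => !((bSieve s).getD p.toNat false))) ↔
      (2 ≤ p ∧ p ≤ s ∧ ¬ HasProperDiv p) := by
  rw [List.mem_filter, PySem.List.mem_pyRange_one]
  constructor
  · rintro ⟨⟨hp2, hps⟩, hunm⟩
    refine ⟨hp2, by omega, ?_⟩
    intro hpd
    rw [hasProperDiv_iff] at hpd
    obtain ⟨hp4, d, hd2, hdd, hd2p⟩ := hpd
    have hcast : ((p.toNat : Int)) = p := Int.toNat_of_nonneg (by omega)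
    have : ((bSieve s).getD p.toNat false) = true := by
      rw [bSieve_getD]
      exact ⟨d, hd2, by rwa [hcast], by omega, by omega⟩
    simp [this] at hunm
  · rintro ⟨hp2, hps, hnd⟩
    refine ⟨⟨hp2, by omega⟩, ?_⟩
    have hcast : ((p.toNat : Int)) = p := Int.toNat_of_nonneg (by omega)
    by_cases hm : ((bSieve s).getD p.toNat false) = true
    · exfalso
      rw [bSieve_getD, hcast] at hm
      obtain ⟨d, hd2, hdd, hd2p, -⟩ := hm
      exact hnd ⟨d, hd2, by omega, hdd⟩
    · simp [hm]

-- B's per-cell test decides HasProperDiv for 4 ≤ x ≤ mx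
theorem bCell_iff (mx x : Int) (hx4 : 4 ≤ x) (hx : x ≤ mx) :
    (((PySem.List.pyRange 2 (bIsqrt mx + 1) 1).filter
        (fun p => !((bSieve (bIsqrt mx)).getD p.toNat false))).any
      (fun p => decide (p * p ≤ x) && (PySem.Int.mod x p == 0)) = true) ↔ HasProperDiv x := by
  obtain ⟨hs1, hsle, hslt⟩ := bIsqrt_spec mx (by omega)
  set s := bIsqrt mx with hsdef
  rw [List.any_eq_true]
  constructor
  · rintro ⟨p, hpmem, hpx⟩
    rw [mem_primes_iff] at hpmem
    obtain ⟨hp2, -, -⟩ := hpmem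
    rw [Bool.and_eq_true, decide_eq_true_eq] at hpx
    obtain ⟨hpp, hmod⟩ := hpx
    have hdvd : p ∣ x := (PySem.Int.mod_eq_zero_iff_dvd x p).mp (by simpa using hmod)
    exact ⟨p, hp2, by nlinarith, hdvd⟩
  · intro hx'
    obtain ⟨d, hd2, hdx, hddvd⟩ := hx'
    -- pass to Nat and take the least prime factor
    set n := x.toNat with hn
    have hxn : (n : Int) = x := Int.toNat_of_nonneg (by omega)
    have hn4 : 4 ≤ n := by omega
    have hdn : d.toNat ∣ n := by
      have : ((d.toNat : Int)) ∣ ((n : Int)) := by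
        rw [hxn, Int.toNat_of_nonneg (by omega : (0:Int) ≤ d)]
        exact hddvd
      exact_mod_cast this
    have hnp : ¬ n.Prime := by
      intro hp
      have := (Nat.prime_def_lt.mp hp).2 d.toNat (by omega) hdn
      omega
    have hm1 : n ≠ 1 := by omega
    have hmp : (n.minFac).Prime := Nat.minFac_prime hm1
    have hmdvd : n.minFac ∣ n := Nat.minFac_dvd n
    have hmsq : n.minFac * n.minFac ≤ n := by
      have := Nat.minFac_sq_le_self (by omega : 0 < n) hnp
      nlinarith [this, sq (n.minFac)]
    refine ⟨(n.minFac : Int), ?_, ?_⟩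
    · rw [mem_primes_iff]
      have hm2 : 2 ≤ n.minFac := hmp.two_le
      have hmles : (n.minFac : Int) ≤ s := by
        by_contra hcon
        push_neg at hcon
        have h1 : (s + 1) * (s + 1) ≤ (n.minFac : Int) * (n.minFac : Int) := by
          have hs0 : 0 ≤ s + 1 := by omega
          have : s + 1 ≤ (n.minFac : Int) := by omega
          nlinarith
        have h2 : ((n.minFac : Int)) * (n.minFac : Int) ≤ x := by
          rw [← hxn]; exact_mod_cast hmsq
        omega
      refine ⟨by exact_mod_cast hm2, hmles, ?_⟩
      rintro ⟨e, he2, hem, hedv⟩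
      have he0 : (0:Int) ≤ e := by omega
      have hedvn : e.toNat ∣ n.minFac := by
        have : ((e.toNat : Int)) ∣ ((n.minFac : Int)) := by
          rw [Int.toNat_of_nonneg he0]; exact hedv
        exact_mod_cast this
      rcases (hmp.eq_one_or_self_of_dvd e.toNat hedvn) with h | h <;> omega
    · rw [Bool.and_eq_true, decide_eq_true_eq]
      constructor
      · rw [← hxn]; exact_mod_cast hmsq
      · have : ((n.minFac : Int)) ∣ x := by
          rw [← hxn]; exact_mod_cast hmdvd
        simp [PySem.Int.mod_eq_zero_iff_dvd, this]

theorem notHasProperDiv_of_lt_four (x : Int) (h : x < 4) : ¬ HasProperDiv x := by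
  rw [hasProperDiv_iff]
  rintro ⟨h4, -⟩
  omega

-- ===== VERDICT (by name: the statement is the Claim_ definition above) =====
theorem fun_hasnoprimes_spec : Claim_equal_fun_hasnoprimes := by
  intro l _
  unfold Spec_fun_hasnoprimes
  rw [funA_eq, fun_hasnoprimes_alt]
  set cells := l.flatMap id with hcells
  by_cases hc : cells = []
  · simp [hc]
  · rw [if_neg hc]
    obtain ⟨mn, hmn⟩ : ∃ mn, PySem.List.min? cells (fun x => x) = some mn := by
      cases h : PySem.List.min? cells (fun x => x) with
      | none => exact absurd ((PySem.List.min?_eq_none_iff cells _).mp h) hc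
      | some mn => exact ⟨mn, rfl⟩
    obtain ⟨mx, hmx⟩ : ∃ mx, PySem.List.max? cells (fun x => x) = some mx := by
      cases h : PySem.List.max? cells (fun x => x) with
      | none => exact absurd ((PySem.List.max?_eq_none_iff cells _).mp h) hc
      | some mx => exact ⟨mx, rfl⟩
    have hmnmem : mn ∈ cells := PySem.List.min?_mem hmn
    have hmnle : ∀ y ∈ cells, mn ≤ y := PySem.List.min?_id_le hmn
    have hmxle : ∀ y ∈ cells, y ≤ mx := PySem.List.max?_id_le hmx
    rw [hmn]
    change (cells.all fun n => !decide (aWhile n 1 0 ≤ 2)) =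
      if mn < 4 then false
      else match PySem.List.max? cells (fun x => x) with
        | none => true
        | some mx =>
          (cells.all fun x =>
            ((PySem.List.pyRange 2 (bIsqrt mx + 1) 1).filter
              (fun p => !((bSieve (bIsqrt mx)).getD p.toNat false))).any
              (fun p => decide (p * p ≤ x) && (PySem.Int.mod x p == 0)))
    by_cases h4 : mn < 4
    · rw [if_pos h4, List.all_eq_false]
      refine ⟨mn, hmnmem, ?_⟩
      have hnd : ¬ HasProperDiv mn := notHasProperDiv_of_lt_four mn h4
      simp only [Bool.not_eq_true, Bool.not_eq_eq_eq_not, Bool.not_false]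
      intro hcontra
      exact hnd ((aCell_iff mn).mp (by simpa using hcontra))
    · rw [if_neg h4, hmx]
      change (cells.all fun n => !decide (aWhile n 1 0 ≤ 2)) =
        (cells.all fun x =>
          ((PySem.List.pyRange 2 (bIsqrt mx + 1) 1).filter
            (fun p => !((bSieve (bIsqrt mx)).getD p.toNat false))).any
            (fun p => decide (p * p ≤ x) && (PySem.Int.mod x p == 0)))
      rw [Bool.eq_iff_iff, List.all_eq_true, List.all_eq_true]
      apply forall_congr'
      intro x
      apply imp_congr_right
      intro hxm
      rw [show ((!decide (aWhile x 1 0 ≤ 2)) = true) ↔ ¬ aWhile x 1 0 ≤ 2 by simp]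
      rw [aCell_iff, ← bCell_iff mx x (by
            have := hmnle x hxm; omega) (hmxle x hxm)]
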